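-- pv_equiv track=rewrite | github.com/madongge/IBI1_2023-24 | Practical9/Favourite_James_Bond.py | favorite_bond
-- ===== SOURCE A (Python) =====
-- def favorite_bond(year_born):
--     bond_actors = {
--         "Roger Moore": (1973, 1986),
--         "Timothy Dalton": (1987, 1994),
--         "Pierce Brosnan": (1995, 2005),
--         "Daniel Craig": (2006, 2021)
--     }
--
--     for actor, (start_year, end_year) in bond_actors.items():
--         if start_year <= year_born <= end_year:
--             return 'Your favorite James Bond actor is {}.'.format(actor)
--
--     return 'Sorry, we can not determine your favorite James Bond actor.'
-- ===== SOURCE B (Python) =====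
-- def favorite_bond(year_born):
--     actors = ["Roger Moore", "Timothy Dalton", "Pierce Brosnan", "Daniel Craig"]
--     boundaries = [1973, 1987, 1995, 2006]
--     lo, hi = 0, len(boundaries)
--     while lo < hi:  # bisect_right by hand (A imports nothing, so no bisect module)
--         mid = (lo + hi) // 2
--         if year_born < boundaries[mid]:
--             hi = mid
--         else:
--             lo = mid + 1
--     i = lo - 1
--     if i < 0 or year_born > 2021:
--         return 'Sorry, we can not determine your favorite James Bond actor.'
--     return 'Your favorite James Bond actor is {}.'.format(actors[i])
-- ===== Notes on version B (the rewrite author's own statement) =====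
-- stated objective: alternative
-- what changed: Replaced the linear scan over the actor/era dict with a sorted boundary list indexed by a hand-written bisect_right binary search.
import Mathlib
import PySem

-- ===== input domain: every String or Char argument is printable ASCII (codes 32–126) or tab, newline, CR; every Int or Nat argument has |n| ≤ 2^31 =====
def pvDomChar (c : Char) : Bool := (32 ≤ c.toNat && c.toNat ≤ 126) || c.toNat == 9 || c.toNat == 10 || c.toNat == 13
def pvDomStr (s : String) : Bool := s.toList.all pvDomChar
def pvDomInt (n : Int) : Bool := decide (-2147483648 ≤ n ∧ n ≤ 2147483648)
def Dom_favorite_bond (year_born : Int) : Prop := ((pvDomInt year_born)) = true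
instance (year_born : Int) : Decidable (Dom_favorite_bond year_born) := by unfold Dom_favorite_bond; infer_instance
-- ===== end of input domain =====

-- B replaces A's linear scan over the era dict by a bisect_right binary search over sorted era boundaries (alternative structure, same result).

-- ===== PORT A =====
-- the for-loop over bond_actors.items() with early return
def bondLoop (xs : List (String × (Int × Int))) (year_born : Int) : String :=
  match xs with
  | [] => "Sorry, we can not determine your favorite James Bond actor."
  | (actor, (start_year, end_year)) :: rest =>
    if start_year ≤ year_born ∧ year_born ≤ end_year then
      "Your favorite James Bond actor is " ++ actor ++ "."
    else bondLoop rest year_born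

def favorite_bond (year_born : Int) : String :=
  let bond_actors : PySem.Dict String (Int × Int) :=
    PySem.Dict.ofList [("Roger Moore", (1973, 1986)), ("Timothy Dalton", (1987, 1994)),
     ("Pierce Brosnan", (1995, 2005)), ("Daniel Craig", (2006, 2021))]
  bondLoop bond_actors.items year_born

-- ===== PORT B =====
-- hand-written bisect_right while-loop from Source B
def bondBisect (bs : List Int) (x : Int) (lo hi : Nat) : Nat :=
  if lo < hi then
    let mid := (lo + hi) / 2
    if x < (PySem.List.pyGet? bs (Int.ofNat mid)).getD 0 then bondBisect bs x lo mid
    else bondBisect bs x (mid + 1) hi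
  else lo
termination_by hi - lo
decreasing_by all_goals omega

def favorite_bond_alt (year_born : Int) : String :=
  let actors : List String := ["Roger Moore", "Timothy Dalton", "Pierce Brosnan", "Daniel Craig"]
  let boundaries : List Int := [1973, 1987, 1995, 2006]
  let lo := bondBisect boundaries year_born 0 boundaries.length
  let i : Int := (lo : Int) - 1
  if i < 0 ∨ year_born > 2021 then
    "Sorry, we can not determine your favorite James Bond actor."
  else
    "Your favorite James Bond actor is " ++ (PySem.List.pyGet? actors i).getD "" ++ "."

-- ===== PRECONDITION & SPEC =====
def Spec_favorite_bond (year_born : Int) (out : String) : Prop := out = favorite_bond_alt year_born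
instance (year_born : Int) (out : String) : Decidable (Spec_favorite_bond year_born out) := by unfold Spec_favorite_bond; infer_instance

-- ===== CLAIM (what is proved, stated in full; the proofs are below) =====
def Claim_equal_favorite_bond : Prop := ∀ (year_born : Int), Dom_favorite_bond year_born → Spec_favorite_bond year_born (favorite_bond year_born)

-- ===== LEMMAS AND PROOFS =====
-- bondBisect on the concrete boundary list, characterised as a nested conditional
theorem bis_val (x : Int) : bondBisect [1973,1987,1995,2006] x 0 4 =
    if x < 1973 then 0 else if x < 1987 then 1 else if x < 1995 then 2 else if x < 2006 then 3 else 4 := by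
  by_cases h1 : x < 1973 <;> by_cases h2 : x < 1987 <;> by_cases h3 : x < 1995 <;> by_cases h4 : x < 2006 <;>
  simp [bondBisect.eq_def, PySem.List.pyGet?, PySem.List.pyIdx?, h1, h2, h3, h4] <;> omega

theorem bond_eq (y : Int) : favorite_bond y = favorite_bond_alt y := by
  unfold favorite_bond favorite_bond_alt
  simp only [List.length_cons, List.length_nil]
  rw [show ((0:Nat)+1+1+1+1) = 4 from rfl, bis_val]
  rw [show (PySem.Dict.ofList [("Roger Moore", ((1973:Int), (1986:Int))), ("Timothy Dalton", (1987, 1994)),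
     ("Pierce Brosnan", (1995, 2005)), ("Daniel Craig", (2006, 2021))]).items =
    [("Roger Moore", (1973, 1986)), ("Timothy Dalton", (1987, 1994)),
     ("Pierce Brosnan", (1995, 2005)), ("Daniel Craig", (2006, 2021))] from rfl]
  simp only [bondLoop]
  split_ifs <;> first | rfl | omega

-- ===== VERDICT (by name: the statement is the Claim_ definition above) =====
theorem favorite_bond_spec : Claim_equal_favorite_bond := by
  intro y _
  exact bond_eq y
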